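-- pv_equiv track=rewrite | github.com/HuadaLian/stock_analyzer | dashboards/symbol_registry.py | _interleave_by_market
-- ===== SOURCE A (Python) =====
-- def _market_bucket(m: str | None) -> str:
--     x = (m or "US").strip().upper()
--     return x if x in {"US", "CN", "HK"} else "US"
--
-- def _interleave_by_market(rows: list[dict], limit: int) -> list[dict]:
--     """Prefer a mix of US/CN/HK when many rows match (avoids one market filling the cap)."""
--     if len(rows) <= limit:
--         return rows
--     buckets: dict[str, list[dict]] = {"US": [], "CN": [], "HK": []}
--     for r in rows:
--         buckets[_market_bucket(r.get("market"))].append(r)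
--     order = ["US", "CN", "HK"]
--     out: list[dict] = []
--     i = 0
--     while len(out) < limit and any(buckets[m] for m in order):
--         m = order[i % 3]
--         i += 1
--         if buckets[m]:
--             out.append(buckets[m].pop(0))
--     for m in order:
--         for r in buckets[m]:
--             if len(out) >= limit:
--                 return out
--             out.append(r)
--     return out
-- ===== SOURCE B (Python) =====
-- def _interleave_by_market(rows: list, limit: int) -> list:
--     """Prefer a mix of US/CN/HK when many rows match (avoids one market filling the cap)."""
--     if len(rows) <= limit:
--         return rows
--     prio = {"US": 0, "CN": 1, "HK": 2}
--     counts = {}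
--     keyed = []
--     for r in rows:
--         m = (r.get("market") or "US").strip().upper()
--         if m not in prio:
--             m = "US"
--         k = counts.get(m, 0)
--         counts[m] = k + 1
--         keyed.append((k * 3 + prio[m], r))
--     keyed.sort(key=lambda t: t[0])
--     out = []
--     for _, r in keyed:
--         if len(out) >= limit:
--             break
--         out.append(r)
--     return out
-- ===== Notes on version B (the rewrite author's own statement) =====
-- stated objective: alternative
-- what changed: Replaces the three-bucket FIFO round-robin while-loop with a single counting pass that gives each row the key rank-within-its-market*3 + market priority (US=0,CN=1,HK=2), one stable sort by that key, and a length-limited prefix copy.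
import Mathlib
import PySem

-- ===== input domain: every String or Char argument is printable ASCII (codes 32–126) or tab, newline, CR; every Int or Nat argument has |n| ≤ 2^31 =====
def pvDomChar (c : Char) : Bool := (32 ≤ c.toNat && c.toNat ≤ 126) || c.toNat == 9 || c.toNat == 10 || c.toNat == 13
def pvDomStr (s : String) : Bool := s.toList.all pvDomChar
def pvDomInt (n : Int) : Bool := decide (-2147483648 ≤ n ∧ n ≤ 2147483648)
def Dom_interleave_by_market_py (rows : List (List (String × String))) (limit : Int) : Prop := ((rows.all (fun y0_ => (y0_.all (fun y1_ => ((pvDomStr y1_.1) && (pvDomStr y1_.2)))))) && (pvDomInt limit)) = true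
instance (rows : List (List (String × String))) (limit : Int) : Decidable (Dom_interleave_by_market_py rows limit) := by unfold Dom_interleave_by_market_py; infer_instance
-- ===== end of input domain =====

-- One honest line: B replaces A's three-bucket FIFO round-robin loop by a counting pass
-- (key = rank-within-market*3 + priority US/CN/HK), one stable sort by that key, and a
-- length-limited prefix copy; same return value, an alternative decomposition (not claimed faster).

abbrev pvRow : Type := List (String × String)

-- ===== PORT A =====
-- def _market_bucket(m): x = (m or "US").strip().upper(); return x if x in {"US","CN","HK"} else "US"
def pvMarketBucket (m : Option String) : String :=
  let x := PySem.Str.upper (PySem.Str.strip (match m with | none => "US" | some s => if s = "" then "US" else s))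
  if x = "US" ∨ x = "CN" ∨ x = "HK" then x else "US"

-- body of A's first for-loop: buckets[_market_bucket(r.get("market"))].append(r)
def pvStepA (b : List pvRow × List pvRow × List pvRow) (r : pvRow) : List pvRow × List pvRow × List pvRow :=
  let m := pvMarketBucket ((PySem.Dict.mk r).get? "market")
  if m = "US" then (b.1 ++ [r], b.2.1, b.2.2)
  else if m = "CN" then (b.1, b.2.1 ++ [r], b.2.2)
  else (b.1, b.2.1, b.2.2 ++ [r])

-- the while-loop: state (out, bU, bC, bH); i is the round counter; fuel only makes the
-- recursion structural (3*|rows|+4 always suffices, proved in loopA_fill_spec below)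
def pvLoopA (fuel : Nat) (bU bC bH : List pvRow) (i : Nat) (out : List pvRow) (limit : Int) :
    List pvRow × List pvRow × List pvRow × List pvRow :=
  match fuel with
  | 0 => (out, bU, bC, bH)
  | fuel + 1 =>
    if (out.length : Int) < limit ∧ (bU ≠ [] ∨ bC ≠ [] ∨ bH ≠ []) then
      if i % 3 = 0 then
        match bU with
        | [] => pvLoopA fuel bU bC bH (i + 1) out limit
        | r :: t => pvLoopA fuel t bC bH (i + 1) (out ++ [r]) limit
      else if i % 3 = 1 then
        match bC with
        | [] => pvLoopA fuel bU bC bH (i + 1) out limit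
        | r :: t => pvLoopA fuel bU t bH (i + 1) (out ++ [r]) limit
      else
        match bH with
        | [] => pvLoopA fuel bU bC bH (i + 1) out limit
        | r :: t => pvLoopA fuel bU bC t (i + 1) (out ++ [r]) limit
    else (out, bU, bC, bH)

-- the trailing for-loop over one bucket: append while len(out) < limit, else return out
def pvFillA (limit : Int) (out : List pvRow) (rem : List pvRow) : List pvRow :=
  match rem with
  | [] => out
  | r :: t => if limit ≤ (out.length : Int) then out else pvFillA limit (out ++ [r]) t

def interleave_by_market_py (rows : List (List (String × String))) (limit : Int) : List (List (String × String)) :=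
  if (rows.length : Int) ≤ limit then rows
  else
    let b := rows.foldl pvStepA ([], [], [])
    let st := pvLoopA (3 * rows.length + 4) b.1 b.2.1 b.2.2 0 [] limit
    pvFillA limit (pvFillA limit (pvFillA limit st.1 st.2.1) st.2.2.1) st.2.2.2

-- ===== PORT B =====
def pvPrio : PySem.Dict String Int := PySem.Dict.mk [("US", 0), ("CN", 1), ("HK", 2)]

-- body of B's counting loop: state (counts, keyed)
def pvStepB (st : PySem.Dict String Int × List (Int × pvRow)) (r : pvRow) :
    PySem.Dict String Int × List (Int × pvRow) :=
  let m0 := PySem.Str.upper (PySem.Str.strip (match (PySem.Dict.mk r).get? "market" with | none => "US" | some s => if s = "" then "US" else s))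
  let m := if pvPrio.contains m0 then m0 else "US"
  let k := st.1.getD m 0
  (st.1.insert m (k + 1), st.2 ++ [(k * 3 + (pvPrio.get? m).getD 0, r)])

-- B's output loop: append rows of the sorted keyed list while len(out) < limit
def pvTakeB (limit : Int) (out : List pvRow) (l : List (Int × pvRow)) : List pvRow :=
  match l with
  | [] => out
  | (_, r) :: t => if limit ≤ (out.length : Int) then out else pvTakeB limit (out ++ [r]) t

def interleave_by_market_py_alt (rows : List (List (String × String))) (limit : Int) : List (List (String × String)) :=
  if (rows.length : Int) ≤ limit then rows
  else
    let keyed := (rows.foldl pvStepB (PySem.Dict.empty, [])).2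
    pvTakeB limit [] (PySem.List.sorted keyed (fun t => t.1) false)

-- ===== PRECONDITION & SPEC =====
def Spec_interleave_by_market_py (rows : List (List (String × String))) (limit : Int) (out : List (List (String × String))) : Prop := out = interleave_by_market_py_alt rows limit
instance (rows : List (List (String × String))) (limit : Int) (out : List (List (String × String))) : Decidable (Spec_interleave_by_market_py rows limit out) := by unfold Spec_interleave_by_market_py; infer_instance

-- ===== CLAIM (what is proved, stated in full; the proofs are below) =====
def Claim_equal_interleave_by_market_py : Prop := ∀ (rows : List (List (String × String))) (limit : Int), Dom_interleave_by_market_py rows limit → Spec_interleave_by_market_py rows limit (interleave_by_market_py rows limit)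

-- ===== LEMMAS AND PROOFS =====

-- the market bucket of a row (A's helper applied to r.get("market"))
def pvBkt (r : pvRow) : String := pvMarketBucket ((PySem.Dict.mk r).get? "market")

-- the three filtered buckets, with the same else-chain as both folds
def pvFU (rs : List pvRow) : List pvRow := rs.filter (fun r => pvBkt r = "US")
def pvFC (rs : List pvRow) : List pvRow := rs.filter (fun r => ¬ pvBkt r = "US" ∧ pvBkt r = "CN")
def pvFH (rs : List pvRow) : List pvRow := rs.filter (fun r => ¬ pvBkt r = "US" ∧ ¬ pvBkt r = "CN")

-- round-robin interleaving of three lists (one element of each per round)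
def pvRR3 {α : Type} (a b c : List α) : List α :=
  if a = [] ∧ b = [] ∧ c = [] then []
  else a.take 1 ++ b.take 1 ++ c.take 1 ++ pvRR3 (a.drop 1) (b.drop 1) (c.drop 1)
termination_by a.length + b.length + c.length
decreasing_by
  simp only [List.length_drop]
  have : 0 < a.length ∨ 0 < b.length ∨ 0 < c.length := by
    rcases a with _ | _ <;> rcases b with _ | _ <;> rcases c with _ | _ <;> simp_all
  omega

-- mid-round views of the round-robin (phase = i % 3)
def pvPph (p : Nat) (a b c : List pvRow) : List pvRow :=
  if p = 0 then pvRR3 a b c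
  else if p = 1 then b.take 1 ++ c.take 1 ++ pvRR3 a (b.drop 1) (c.drop 1)
  else c.take 1 ++ pvRR3 a b (c.drop 1)

-- steps of fuel the loop may still spend before its next pop (or exit)
def pvEps (p : Nat) (a b c : List pvRow) : Nat :=
  if p = 0 then (if a ≠ [] then 0 else if b ≠ [] then 1 else if c ≠ [] then 2 else 3)
  else if p = 1 then (if b ≠ [] then 0 else if c ≠ [] then 1 else if a ≠ [] then 2 else 3)
  else (if c ≠ [] then 0 else if a ≠ [] then 1 else if b ≠ [] then 2 else 3)

-- keyed bucket: rows annotated with c*3+p, c counting on from the given start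
def pvEnum (p : Int) (c : Nat) : List pvRow → List (Int × pvRow)
  | [] => []
  | r :: t => ((c : Int) * 3 + p, r) :: pvEnum p (c + 1) t

-- what B's counting pass produces (counts cU cC cH already consumed)
def pvMkKeyed : List pvRow → Nat → Nat → Nat → List (Int × pvRow)
  | [], _, _, _ => []
  | r :: t, cU, cC, cH =>
    if pvBkt r = "US" then ((cU : Int) * 3 + 0, r) :: pvMkKeyed t (cU + 1) cC cH
    else if pvBkt r = "CN" then ((cC : Int) * 3 + 1, r) :: pvMkKeyed t cU (cC + 1) cH
    else ((cH : Int) * 3 + 2, r) :: pvMkKeyed t cU cC (cH + 1)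

theorem pvRR3_nil {α : Type} : pvRR3 ([] : List α) [] [] = [] := by
  unfold pvRR3; simp

theorem pvRR3_eq {α : Type} {a b c : List α} (h : ¬(a = [] ∧ b = [] ∧ c = [])) :
    pvRR3 a b c = a.take 1 ++ b.take 1 ++ c.take 1 ++ pvRR3 (a.drop 1) (b.drop 1) (c.drop 1) := by
  rw [pvRR3]; simp [h]


-- phase-step equations of the round-robin
theorem pvPph_empty (p : Nat) : pvPph p [] [] [] = [] := by
  unfold pvPph; simp [pvRR3_nil]

theorem pvPph_pop0 (r : pvRow) (t b c : List pvRow) : pvPph 0 (r :: t) b c = r :: pvPph 1 t b c := by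
  unfold pvPph; rw [pvRR3_eq (by simp)]; simp

theorem pvPph_skip0 (b c : List pvRow) : pvPph 0 [] b c = pvPph 1 [] b c := by
  unfold pvPph
  by_cases h : b = [] ∧ c = []
  · obtain ⟨hb, hc⟩ := h; subst hb; subst hc; simp [pvRR3_nil]
  · rw [pvRR3_eq (by tauto)]; simp

theorem pvPph_pop1 (a : List pvRow) (r : pvRow) (t c : List pvRow) :
    pvPph 1 a (r :: t) c = r :: pvPph 2 a t c := by
  unfold pvPph; simp

theorem pvPph_skip1 (a c : List pvRow) : pvPph 1 a [] c = pvPph 2 a [] c := by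
  unfold pvPph; simp

theorem pvPph_pop2 (a b : List pvRow) (r : pvRow) (t : List pvRow) :
    pvPph 2 a b (r :: t) = r :: pvPph 0 a b t := by
  unfold pvPph; simp

theorem pvPph_skip2 (a b : List pvRow) : pvPph 2 a b [] = pvPph 0 a b [] := by
  unfold pvPph; simp

theorem pvFillA_of_ge {limit : Int} {out : List pvRow} (h : limit ≤ (out.length : Int))
    (rem : List pvRow) : pvFillA limit out rem = out := by
  cases rem <;> simp [pvFillA, h]

theorem pvLoopA_empty (fuel i : Nat) (out : List pvRow) (limit : Int) :
    pvLoopA fuel [] [] [] i out limit = (out, [], [], []) := by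
  cases fuel <;> simp [pvLoopA]

theorem pvEps_le_three (p : Nat) (a b c : List pvRow) : pvEps p a b c ≤ 3 := by
  unfold pvEps; split_ifs <;> omega

theorem pvEps_le_two (p : Nat) {a b c : List pvRow} (h : ¬(a = [] ∧ b = [] ∧ c = [])) :
    pvEps p a b c ≤ 2 := by
  unfold pvEps; split_ifs <;> first | omega | tauto

def pvAfter (limit : Int) (st : List pvRow × List pvRow × List pvRow × List pvRow) : List pvRow :=
  pvFillA limit (pvFillA limit (pvFillA limit st.1 st.2.1) st.2.2.1) st.2.2.2


theorem pvLoopA_skip0 (f i : Nat) (out : List pvRow) (limit : Int) (bC bH : List pvRow)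
    (hc : (out.length : Int) < limit ∧ (([] : List pvRow) ≠ [] ∨ bC ≠ [] ∨ bH ≠ []))
    (hp : i % 3 = 0) :
    pvLoopA (f + 1) [] bC bH i out limit = pvLoopA f [] bC bH (i + 1) out limit := by
  simp [pvLoopA, hc, hp]
  intro h1 h2
  exfalso
  rcases hc.2 with h' | h' | h' <;> simp_all

theorem pvLoopA_pop0 (f i : Nat) (out : List pvRow) (limit : Int) (r : pvRow) (t bC bH : List pvRow)
    (hc : (out.length : Int) < limit ∧ (r :: t ≠ [] ∨ bC ≠ [] ∨ bH ≠ []))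
    (hp : i % 3 = 0) :
    pvLoopA (f + 1) (r :: t) bC bH i out limit = pvLoopA f t bC bH (i + 1) (out ++ [r]) limit := by
  simp [pvLoopA, hc, hp]

theorem pvLoopA_skip1 (f i : Nat) (out : List pvRow) (limit : Int) (bU bH : List pvRow)
    (hc : (out.length : Int) < limit ∧ (bU ≠ [] ∨ ([] : List pvRow) ≠ [] ∨ bH ≠ []))
    (hp : i % 3 = 1) :
    pvLoopA (f + 1) bU [] bH i out limit = pvLoopA f bU [] bH (i + 1) out limit := by
  simp [pvLoopA, hc, hp]
  intro h1 h2
  exfalso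
  rcases hc.2 with h' | h' | h' <;> simp_all

theorem pvLoopA_pop1 (f i : Nat) (out : List pvRow) (limit : Int) (r : pvRow) (bU t bH : List pvRow)
    (hc : (out.length : Int) < limit ∧ (bU ≠ [] ∨ r :: t ≠ [] ∨ bH ≠ []))
    (hp : i % 3 = 1) :
    pvLoopA (f + 1) bU (r :: t) bH i out limit = pvLoopA f bU t bH (i + 1) (out ++ [r]) limit := by
  simp [pvLoopA, hc, hp]

theorem pvLoopA_skip2 (f i : Nat) (out : List pvRow) (limit : Int) (bU bC : List pvRow)
    (hc : (out.length : Int) < limit ∧ (bU ≠ [] ∨ bC ≠ [] ∨ ([] : List pvRow) ≠ []))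
    (hp : i % 3 = 2) :
    pvLoopA (f + 1) bU bC [] i out limit = pvLoopA f bU bC [] (i + 1) out limit := by
  simp [pvLoopA, hc, hp]
  intro h1 h2
  exfalso
  rcases hc.2 with h' | h' | h' <;> simp_all

theorem pvLoopA_pop2 (f i : Nat) (out : List pvRow) (limit : Int) (r : pvRow) (bU bC t : List pvRow)
    (hc : (out.length : Int) < limit ∧ (bU ≠ [] ∨ bC ≠ [] ∨ r :: t ≠ []))
    (hp : i % 3 = 2) :
    pvLoopA (f + 1) bU bC (r :: t) i out limit = pvLoopA f bU bC t (i + 1) (out ++ [r]) limit := by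
  simp [pvLoopA, hc, hp]

theorem pvLoopA_fill_spec : ∀ (fuel : Nat) (bU bC bH : List pvRow) (i : Nat) (out : List pvRow) (limit : Int),
    3 * (bU.length + bC.length + bH.length) + pvEps (i % 3) bU bC bH + 1 ≤ fuel →
    pvAfter limit (pvLoopA fuel bU bC bH i out limit)
      = out ++ List.take (limit - out.length).toNat (pvPph (i % 3) bU bC bH) := by
  intro fuel
  induction fuel with
  | zero => intro bU bC bH i out limit h; exfalso; omega
  | succ f IH =>
    intro bU bC bH i out limit h
    by_cases hcond : ((out.length : Int) < limit ∧ (bU ≠ [] ∨ bC ≠ [] ∨ bH ≠ []))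
    · have hp : i % 3 = 0 ∨ i % 3 = 1 ∨ i % 3 = 2 := by omega
      rcases hp with hp | hp | hp
      · -- phase 0: US bucket
        cases bU with
        | nil =>
          have hCH : bC ≠ [] ∨ bH ≠ [] := by
            rcases hcond.2 with h' | h' | h'
            · exact absurd rfl h'
            · exact Or.inl h'
            · exact Or.inr h'
          have hp1 : (i + 1) % 3 = 1 := by omega
          have hbound : 3 * (([] : List pvRow).length + bC.length + bH.length) + pvEps ((i + 1) % 3) [] bC bH + 1 ≤ f := by
            by_cases hc1 : bC = [] <;> by_cases hh1 : bH = [] <;>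
              simp [pvEps, hp, hp1, hc1, hh1] at hCH h ⊢ <;> omega
          rw [pvLoopA_skip0 f i out limit bC bH hcond hp, IH [] bC bH (i + 1) out limit hbound,
            hp1, hp, pvPph_skip0]
        | cons r t =>
          by_cases hrest : t = [] ∧ bC = [] ∧ bH = []
          · obtain ⟨h1', h2', h3'⟩ := hrest; subst h1'; subst h2'; subst h3'
            rw [pvLoopA_pop0 f i out limit r [] [] [] hcond hp, pvLoopA_empty]
            have hm : ((limit : Int) - out.length).toNat = (limit - (out.length : Int) - 1).toNat + 1 := by
              have := hcond.1; omega
            rw [hp, pvPph_pop0, hm, List.take_succ_cons]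
            simp [pvAfter, pvFillA, pvPph_empty]
          · have hp1 : (i + 1) % 3 = 1 := by omega
            have hbound : 3 * (t.length + bC.length + bH.length) + pvEps ((i + 1) % 3) t bC bH + 1 ≤ f := by
              have h2 := pvEps_le_two ((i + 1) % 3) hrest
              simp [pvEps, hp] at h
              omega
            rw [pvLoopA_pop0 f i out limit r t bC bH hcond hp,
              IH t bC bH (i + 1) (out ++ [r]) limit hbound, hp1]
            have hidx : (limit - ((out ++ [r]).length : Int)).toNat = (limit - (out.length : Int) - 1).toNat := by
              simp [List.length_append]; omega
            have hm : ((limit : Int) - out.length).toNat = (limit - (out.length : Int) - 1).toNat + 1 := by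
              have := hcond.1; omega
            rw [hidx, hp, pvPph_pop0, hm, List.take_succ_cons]
            simp [List.append_assoc]
      · -- phase 1: CN bucket
        cases bC with
        | nil =>
          have hCH : bU ≠ [] ∨ bH ≠ [] := by
            rcases hcond.2 with h' | h' | h'
            · exact Or.inl h'
            · exact absurd rfl h'
            · exact Or.inr h'
          have hp1 : (i + 1) % 3 = 2 := by omega
          have hbound : 3 * (bU.length + ([] : List pvRow).length + bH.length) + pvEps ((i + 1) % 3) bU [] bH + 1 ≤ f := by
            by_cases hc1 : bU = [] <;> by_cases hh1 : bH = [] <;>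
              simp [pvEps, hp, hp1, hc1, hh1] at hCH h ⊢ <;> omega
          rw [pvLoopA_skip1 f i out limit bU bH hcond hp, IH bU [] bH (i + 1) out limit hbound,
            hp1, hp, pvPph_skip1]
        | cons r t =>
          by_cases hrest : bU = [] ∧ t = [] ∧ bH = []
          · obtain ⟨h1', h2', h3'⟩ := hrest; subst h1'; subst h2'; subst h3'
            rw [pvLoopA_pop1 f i out limit r [] [] [] hcond hp, pvLoopA_empty]
            have hm : ((limit : Int) - out.length).toNat = (limit - (out.length : Int) - 1).toNat + 1 := by
              have := hcond.1; omega
            rw [hp, pvPph_pop1, hm, List.take_succ_cons]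
            simp [pvAfter, pvFillA, pvPph_empty]
          · have hp1 : (i + 1) % 3 = 2 := by omega
            have hbound : 3 * (bU.length + t.length + bH.length) + pvEps ((i + 1) % 3) bU t bH + 1 ≤ f := by
              have h2 := pvEps_le_two ((i + 1) % 3) hrest
              simp [pvEps, hp] at h
              omega
            rw [pvLoopA_pop1 f i out limit r bU t bH hcond hp,
              IH bU t bH (i + 1) (out ++ [r]) limit hbound, hp1]
            have hidx : (limit - ((out ++ [r]).length : Int)).toNat = (limit - (out.length : Int) - 1).toNat := by
              simp [List.length_append]; omega
            have hm : ((limit : Int) - out.length).toNat = (limit - (out.length : Int) - 1).toNat + 1 := by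
              have := hcond.1; omega
            rw [hidx, hp, pvPph_pop1, hm, List.take_succ_cons]
            simp [List.append_assoc]
      · -- phase 2: HK bucket
        cases bH with
        | nil =>
          have hCH : bU ≠ [] ∨ bC ≠ [] := by
            rcases hcond.2 with h' | h' | h'
            · exact Or.inl h'
            · exact Or.inr h'
            · exact absurd rfl h'
          have hp1 : (i + 1) % 3 = 0 := by omega
          have hbound : 3 * (bU.length + bC.length + ([] : List pvRow).length) + pvEps ((i + 1) % 3) bU bC [] + 1 ≤ f := by
            by_cases hc1 : bU = [] <;> by_cases hh1 : bC = [] <;>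
              simp [pvEps, hp, hp1, hc1, hh1] at hCH h ⊢ <;> omega
          rw [pvLoopA_skip2 f i out limit bU bC hcond hp, IH bU bC [] (i + 1) out limit hbound,
            hp1, hp, pvPph_skip2]
        | cons r t =>
          by_cases hrest : bU = [] ∧ bC = [] ∧ t = []
          · obtain ⟨h1', h2', h3'⟩ := hrest; subst h1'; subst h2'; subst h3'
            rw [pvLoopA_pop2 f i out limit r [] [] [] hcond hp, pvLoopA_empty]
            have hm : ((limit : Int) - out.length).toNat = (limit - (out.length : Int) - 1).toNat + 1 := by
              have := hcond.1; omega
            rw [hp, pvPph_pop2, hm, List.take_succ_cons]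
            simp [pvAfter, pvFillA, pvPph_empty]
          · have hp1 : (i + 1) % 3 = 0 := by omega
            have hbound : 3 * (bU.length + bC.length + t.length) + pvEps ((i + 1) % 3) bU bC t + 1 ≤ f := by
              have h2 := pvEps_le_two ((i + 1) % 3) hrest
              simp [pvEps, hp] at h
              omega
            rw [pvLoopA_pop2 f i out limit r bU bC t hcond hp,
              IH bU bC t (i + 1) (out ++ [r]) limit hbound, hp1]
            have hidx : (limit - ((out ++ [r]).length : Int)).toNat = (limit - (out.length : Int) - 1).toNat := by
              simp [List.length_append]; omega
            have hm : ((limit : Int) - out.length).toNat = (limit - (out.length : Int) - 1).toNat + 1 := by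
              have := hcond.1; omega
            rw [hidx, hp, pvPph_pop2, hm, List.take_succ_cons]
            simp [List.append_assoc]
    · have hexit : pvLoopA (f + 1) bU bC bH i out limit = (out, bU, bC, bH) := by
        simp only [pvLoopA, if_neg hcond]
      rw [hexit]
      by_cases hlt : (out.length : Int) < limit
      · have hall : bU = [] ∧ bC = [] ∧ bH = [] := by
          by_contra hno
          exact hcond ⟨hlt, by tauto⟩
        obtain ⟨h1', h2', h3'⟩ := hall; subst h1'; subst h2'; subst h3'
        simp [pvAfter, pvFillA, pvPph_empty]
      · have hge : limit ≤ (out.length : Int) := by omega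
        have h0 : ((limit : Int) - out.length).toNat = 0 := by omega
        simp [pvAfter, pvFillA_of_ge hge, h0]

theorem pvTakeB_spec : ∀ (l : List (Int × pvRow)) (out : List pvRow) (limit : Int),
    pvTakeB limit out l = out ++ (l.take (limit - out.length).toNat).map Prod.snd := by
  intro l
  induction l with
  | nil => intro out limit; simp [pvTakeB]
  | cons p t IH =>
    intro out limit
    obtain ⟨k, r⟩ := p
    by_cases h : limit ≤ (out.length : Int)
    · have h0 : ((limit : Int) - out.length).toNat = 0 := by omega
      simp [pvTakeB, h, h0]
    · have hn : ((limit : Int) - out.length).toNat = (limit - ((out.length : Int) + 1)).toNat + 1 := by omega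
      simp only [pvTakeB, if_neg h]
      rw [IH, hn, List.take_succ_cons]
      simp [List.append_assoc]

theorem pvBkt_cases (r : pvRow) : pvBkt r = "US" ∨ pvBkt r = "CN" ∨ pvBkt r = "HK" := by
  unfold pvBkt pvMarketBucket
  dsimp only
  split_ifs with h
  · exact h
  · left; rfl

theorem pvStepA_eq (b : List pvRow × List pvRow × List pvRow) (r : pvRow) :
    pvStepA b r =
      if pvBkt r = "US" then (b.1 ++ [r], b.2.1, b.2.2)
      else if pvBkt r = "CN" then (b.1, b.2.1 ++ [r], b.2.2)
      else (b.1, b.2.1, b.2.2 ++ [r]) := rfl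

theorem pvContains_if (m0 : String) : (if pvPrio.contains m0 then m0 else "US")
    = (if m0 = "US" ∨ m0 = "CN" ∨ m0 = "HK" then m0 else "US") := by
  by_cases h1 : m0 = "US"
  · simp [h1, pvPrio, PySem.Dict.contains_mk]
  · by_cases h2 : m0 = "CN"
    · simp [h2, pvPrio, PySem.Dict.contains_mk]
    · by_cases h3 : m0 = "HK"
      · simp [h3, pvPrio, PySem.Dict.contains_mk]
      · have hc : pvPrio.contains m0 = false := by
          simp [pvPrio, PySem.Dict.contains_mk]
          exact ⟨fun h => h1 h.symm, fun h => h2 h.symm, fun h => h3 h.symm⟩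
        simp [hc, h1, h2, h3]

theorem pvStepB_eq (st : PySem.Dict String Int × List (Int × pvRow)) (r : pvRow) :
    pvStepB st r =
      if pvBkt r = "US" then
        (st.1.insert "US" (st.1.getD "US" 0 + 1), st.2 ++ [(st.1.getD "US" 0 * 3 + 0, r)])
      else if pvBkt r = "CN" then
        (st.1.insert "CN" (st.1.getD "CN" 0 + 1), st.2 ++ [(st.1.getD "CN" 0 * 3 + 1, r)])
      else
        (st.1.insert "HK" (st.1.getD "HK" 0 + 1), st.2 ++ [(st.1.getD "HK" 0 * 3 + 2, r)]) := by
  unfold pvStepB pvBkt pvMarketBucket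
  dsimp only
  rw [pvContains_if]
  generalize (PySem.Str.upper (PySem.Str.strip (match (PySem.Dict.mk r).get? "market" with | none => "US" | some s => if s = "" then "US" else s))) = m0
  by_cases h1 : m0 = "US"
  · simp [h1, pvPrio, PySem.Dict.get?_mk_cons]
  · by_cases h2 : m0 = "CN"
    · simp [h2, pvPrio, PySem.Dict.get?_mk_cons]
    · by_cases h3 : m0 = "HK"
      · simp [h3, pvPrio, PySem.Dict.get?_mk_cons]
      · simp [h1, h2, h3, pvPrio, PySem.Dict.get?_mk_cons]

theorem pvFoldA_spec : ∀ (rs : List pvRow) (b0 b1 b2 : List pvRow),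
    rs.foldl pvStepA (b0, b1, b2) = (b0 ++ pvFU rs, b1 ++ pvFC rs, b2 ++ pvFH rs) := by
  intro rs
  induction rs with
  | nil => intro b0 b1 b2; simp [pvFU, pvFC, pvFH]
  | cons r t IH =>
    intro b0 b1 b2
    simp only [List.foldl_cons, pvStepA_eq]
    by_cases h1 : pvBkt r = "US"
    · simp only [if_pos h1]
      rw [IH]
      simp [pvFU, pvFC, pvFH, List.filter_cons, h1]
    · by_cases h2 : pvBkt r = "CN"
      · simp only [if_neg h1, if_pos h2]
        rw [IH]
        simp [pvFU, pvFC, pvFH, List.filter_cons, h1, h2]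
      · simp only [if_neg h1, if_neg h2]
        rw [IH]
        simp [pvFU, pvFC, pvFH, List.filter_cons, h1, h2]

theorem pvFoldB_spec : ∀ (rs : List pvRow) (d : PySem.Dict String Int) (acc : List (Int × pvRow)) (cU cC cH : Nat),
    d.getD "US" 0 = (cU : Int) → d.getD "CN" 0 = (cC : Int) → d.getD "HK" 0 = (cH : Int) →
    (rs.foldl pvStepB (d, acc)).2 = acc ++ pvMkKeyed rs cU cC cH := by
  intro rs
  induction rs with
  | nil => intro d acc cU cC cH h1 h2 h3; simp [pvMkKeyed]
  | cons r t IH =>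
    intro d acc cU cC cH h1 h2 h3
    simp only [List.foldl_cons, pvStepB_eq]
    rcases pvBkt_cases r with hb | hb | hb
    · rw [if_pos hb]
      rw [IH _ _ (cU + 1) cC cH]
      · simp [pvMkKeyed, hb, h1, List.append_assoc]
      · rw [PySem.Dict.getD_insert_self, h1]; push_cast; ring
      · rw [PySem.Dict.getD_insert_of_ne _ _ _ (by decide)]; exact h2
      · rw [PySem.Dict.getD_insert_of_ne _ _ _ (by decide)]; exact h3
    · have hb' : ¬ pvBkt r = "US" := by rw [hb]; decide
      rw [if_neg hb', if_pos hb]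
      rw [IH _ _ cU (cC + 1) cH]
      · simp [pvMkKeyed, hb, hb', h2, List.append_assoc]
      · rw [PySem.Dict.getD_insert_of_ne _ _ _ (by decide)]; exact h1
      · rw [PySem.Dict.getD_insert_self, h2]; push_cast; ring
      · rw [PySem.Dict.getD_insert_of_ne _ _ _ (by decide)]; exact h3
    · have hb' : ¬ pvBkt r = "US" := by rw [hb]; decide
      have hb'' : ¬ pvBkt r = "CN" := by rw [hb]; decide
      rw [if_neg hb', if_neg hb'']
      rw [IH _ _ cU cC (cH + 1)]
      · simp [pvMkKeyed, hb', hb'', h3, List.append_assoc]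
      · rw [PySem.Dict.getD_insert_of_ne _ _ _ (by decide)]; exact h1
      · rw [PySem.Dict.getD_insert_of_ne _ _ _ (by decide)]; exact h2
      · rw [PySem.Dict.getD_insert_self, h3]; push_cast; ring

theorem pvMkKeyed_perm : ∀ (rs : List pvRow) (cU cC cH : Nat),
    (pvMkKeyed rs cU cC cH).Perm
      (pvEnum 0 cU (pvFU rs) ++ pvEnum 1 cC (pvFC rs) ++ pvEnum 2 cH (pvFH rs)) := by
  intro rs
  induction rs with
  | nil => intro cU cC cH; simp [pvMkKeyed, pvFU, pvFC, pvFH, pvEnum]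
  | cons r t IH =>
    intro cU cC cH
    rcases pvBkt_cases r with hb | hb | hb
    · have hU : pvFU (r :: t) = r :: pvFU t := by simp [pvFU, List.filter_cons, hb]
      have hC : pvFC (r :: t) = pvFC t := by simp [pvFC, List.filter_cons, hb]
      have hH : pvFH (r :: t) = pvFH t := by simp [pvFH, List.filter_cons, hb]
      rw [hU, hC, hH]
      simp only [pvMkKeyed, if_pos hb, pvEnum, List.cons_append]
      exact (IH (cU + 1) cC cH).cons _
    · have hb' : ¬ pvBkt r = "US" := by rw [hb]; decide
      have hU : pvFU (r :: t) = pvFU t := by simp [pvFU, List.filter_cons, hb']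
      have hC : pvFC (r :: t) = r :: pvFC t := by simp [pvFC, List.filter_cons, hb, hb']
      have hH : pvFH (r :: t) = pvFH t := by simp [pvFH, List.filter_cons, hb]
      rw [hU, hC, hH]
      simp only [pvMkKeyed, if_neg hb', if_pos hb, pvEnum]
      have h2 : List.Perm ((pvEnum 0 cU (pvFU t) ++ (((cC : Int) * 3 + 1, r) :: pvEnum 1 (cC + 1) (pvFC t))) ++ pvEnum 2 cH (pvFH t))
          ((((cC : Int) * 3 + 1, r)) :: ((pvEnum 0 cU (pvFU t) ++ pvEnum 1 (cC + 1) (pvFC t)) ++ pvEnum 2 cH (pvFH t))) :=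
        List.perm_middle.append_right _
      exact ((IH cU (cC + 1) cH).cons _).trans h2.symm
    · have hb' : ¬ pvBkt r = "US" := by rw [hb]; decide
      have hb'' : ¬ pvBkt r = "CN" := by rw [hb]; decide
      have hU : pvFU (r :: t) = pvFU t := by simp [pvFU, List.filter_cons, hb']
      have hC : pvFC (r :: t) = pvFC t := by simp [pvFC, List.filter_cons, hb'']
      have hH : pvFH (r :: t) = r :: pvFH t := by simp [pvFH, List.filter_cons, hb', hb'']
      rw [hU, hC, hH]
      simp only [pvMkKeyed, if_neg hb', if_neg hb'', pvEnum]
      exact ((IH cU cC (cH + 1)).cons _).trans List.perm_middle.symm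

theorem pvRR3_perm {α : Type} : ∀ (N : Nat) (a b c : List α), a.length + b.length + c.length ≤ N →
    (pvRR3 a b c).Perm (a ++ b ++ c) := by
  intro N
  induction N with
  | zero =>
    intro a b c h
    have ha : a = [] := List.eq_nil_of_length_eq_zero (by omega)
    have hb : b = [] := List.eq_nil_of_length_eq_zero (by omega)
    have hc : c = [] := List.eq_nil_of_length_eq_zero (by omega)
    subst ha; subst hb; subst hc
    simp [pvRR3_nil]
  | succ N IH =>
    intro a b c h
    by_cases hall : a = [] ∧ b = [] ∧ c = []
    · obtain ⟨ha, hb, hc⟩ := hall; subst ha; subst hb; subst hc; simp [pvRR3_nil]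
    · rw [pvRR3_eq hall]
      have hpos : 0 < a.length ∨ 0 < b.length ∨ 0 < c.length := by
        rcases a with _ | _ <;> rcases b with _ | _ <;> rcases c with _ | _ <;> simp_all
      have hr := IH (a.drop 1) (b.drop 1) (c.drop 1) (by simp [List.length_drop]; omega)
      rw [← Multiset.coe_eq_coe] at hr ⊢
      have ha' : (↑a : Multiset α) = ↑(a.take 1) + ↑(a.drop 1) := by
        conv_lhs => rw [← List.take_append_drop 1 a]
        rw [Multiset.coe_add]
      have hb' : (↑b : Multiset α) = ↑(b.take 1) + ↑(b.drop 1) := by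
        conv_lhs => rw [← List.take_append_drop 1 b]
        rw [Multiset.coe_add]
      have hc' : (↑c : Multiset α) = ↑(c.take 1) + ↑(c.drop 1) := by
        conv_lhs => rw [← List.take_append_drop 1 c]
        rw [Multiset.coe_add]
      simp only [← Multiset.coe_add] at hr ⊢
      rw [hr, ha', hb', hc']
      abel

theorem pvRR3_map {α β : Type} (f : α → β) : ∀ (N : Nat) (a b c : List α),
    a.length + b.length + c.length ≤ N →
    pvRR3 (a.map f) (b.map f) (c.map f) = (pvRR3 a b c).map f := by
  intro N
  induction N with
  | zero =>
    intro a b c h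
    have ha : a = [] := List.eq_nil_of_length_eq_zero (by omega)
    have hb : b = [] := List.eq_nil_of_length_eq_zero (by omega)
    have hc : c = [] := List.eq_nil_of_length_eq_zero (by omega)
    subst ha; subst hb; subst hc
    simp [pvRR3_nil]
  | succ N IH =>
    intro a b c h
    by_cases hall : a = [] ∧ b = [] ∧ c = []
    · obtain ⟨ha, hb, hc⟩ := hall; subst ha; subst hb; subst hc; simp [pvRR3_nil]
    · have hall' : ¬(a.map f = [] ∧ b.map f = [] ∧ c.map f = []) := by
        simp only [List.map_eq_nil_iff]; exact hall
      have hpos : 0 < a.length ∨ 0 < b.length ∨ 0 < c.length := by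
        rcases a with _ | _ <;> rcases b with _ | _ <;> rcases c with _ | _ <;> simp_all
      rw [pvRR3_eq hall, pvRR3_eq hall']
      rw [← List.map_take, ← List.map_take, ← List.map_take, ← List.map_drop, ← List.map_drop, ← List.map_drop]
      rw [IH _ _ _ (by simp [List.length_drop]; omega)]
      simp [List.map_append]

theorem pvEnum_map_snd (p : Int) : ∀ (l : List pvRow) (c : Nat), (pvEnum p c l).map Prod.snd = l := by
  intro l
  induction l with
  | nil => intro c; simp [pvEnum]
  | cons r t IH => intro c; simp [pvEnum, IH]

theorem pvRR3_enum_sorted : ∀ (N : Nat) (u c h : List pvRow) (j : Nat),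
    u.length + c.length + h.length ≤ N →
    List.Pairwise (fun x y => x.1 < y.1) (pvRR3 (pvEnum 0 j u) (pvEnum 1 j c) (pvEnum 2 j h)) ∧
    ∀ x ∈ pvRR3 (pvEnum 0 j u) (pvEnum 1 j c) (pvEnum 2 j h), (j : Int) * 3 ≤ x.1 := by
  intro N
  induction N with
  | zero =>
    intro u c h j hlen
    have hu : u = [] := List.eq_nil_of_length_eq_zero (by omega)
    have hc : c = [] := List.eq_nil_of_length_eq_zero (by omega)
    have hh : h = [] := List.eq_nil_of_length_eq_zero (by omega)
    subst hu; subst hc; subst hh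
    simp [pvEnum, pvRR3_nil]
  | succ N IH =>
    intro u c h j hlen
    rcases u with _ | ⟨ru, tu⟩ <;> rcases c with _ | ⟨rc, tc⟩ <;> rcases h with _ | ⟨rh, th⟩
    · simp [pvEnum, pvRR3_nil]
    case succ.nil.nil.cons =>
      rw [pvRR3_eq (by simp [pvEnum])]
      obtain ⟨IH1, IH2⟩ := IH [] [] th (j + 1) (by simp at hlen ⊢; omega)
      simp only [pvEnum] at IH1 IH2 ⊢
      simp only [List.take_succ_cons, List.take_zero, List.take_nil, List.drop_succ_cons,
        List.drop_zero, List.drop_nil, List.nil_append, List.append_nil, List.cons_append]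
      constructor
      · refine List.Pairwise.cons ?_ (IH1)
        · intro x hx
          have := IH2 x hx; push_cast at this ⊢; omega
      · intro x hx
        simp only [List.mem_cons] at hx
        rcases hx with rfl | hx
        · simp; try omega
        have := IH2 x hx; push_cast at this ⊢; omega
    case succ.nil.cons.nil =>
      rw [pvRR3_eq (by simp [pvEnum])]
      obtain ⟨IH1, IH2⟩ := IH [] tc [] (j + 1) (by simp at hlen ⊢; omega)
      simp only [pvEnum] at IH1 IH2 ⊢
      simp only [List.take_succ_cons, List.take_zero, List.take_nil, List.drop_succ_cons,
        List.drop_zero, List.drop_nil, List.nil_append, List.append_nil, List.cons_append]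
      constructor
      · refine List.Pairwise.cons ?_ (IH1)
        · intro x hx
          have := IH2 x hx; push_cast at this ⊢; omega
      · intro x hx
        simp only [List.mem_cons] at hx
        rcases hx with rfl | hx
        · simp; try omega
        have := IH2 x hx; push_cast at this ⊢; omega
    case succ.nil.cons.cons =>
      rw [pvRR3_eq (by simp [pvEnum])]
      obtain ⟨IH1, IH2⟩ := IH [] tc th (j + 1) (by simp at hlen ⊢; omega)
      simp only [pvEnum] at IH1 IH2 ⊢
      simp only [List.take_succ_cons, List.take_zero, List.take_nil, List.drop_succ_cons,
        List.drop_zero, List.drop_nil, List.nil_append, List.append_nil, List.cons_append]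
      constructor
      · refine List.Pairwise.cons ?_ (List.Pairwise.cons ?_ (IH1))
        · intro x hx
          simp only [List.mem_cons] at hx
          rcases hx with rfl | hx
          · simp; try omega
          have := IH2 x hx; push_cast at this ⊢; omega
        · intro x hx
          have := IH2 x hx; push_cast at this ⊢; omega
      · intro x hx
        simp only [List.mem_cons] at hx
        rcases hx with rfl | hx
        · simp; try omega
        rcases hx with rfl | hx
        · simp; try omega
        have := IH2 x hx; push_cast at this ⊢; omega
    case succ.cons.nil.nil =>
      rw [pvRR3_eq (by simp [pvEnum])]
      obtain ⟨IH1, IH2⟩ := IH tu [] [] (j + 1) (by simp at hlen ⊢; omega)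
      simp only [pvEnum] at IH1 IH2 ⊢
      simp only [List.take_succ_cons, List.take_zero, List.take_nil, List.drop_succ_cons,
        List.drop_zero, List.drop_nil, List.nil_append, List.append_nil, List.cons_append]
      constructor
      · refine List.Pairwise.cons ?_ (IH1)
        · intro x hx
          have := IH2 x hx; push_cast at this ⊢; omega
      · intro x hx
        simp only [List.mem_cons] at hx
        rcases hx with rfl | hx
        · simp; try omega
        have := IH2 x hx; push_cast at this ⊢; omega
    case succ.cons.nil.cons =>
      rw [pvRR3_eq (by simp [pvEnum])]
      obtain ⟨IH1, IH2⟩ := IH tu [] th (j + 1) (by simp at hlen ⊢; omega)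
      simp only [pvEnum] at IH1 IH2 ⊢
      simp only [List.take_succ_cons, List.take_zero, List.take_nil, List.drop_succ_cons,
        List.drop_zero, List.drop_nil, List.nil_append, List.append_nil, List.cons_append]
      constructor
      · refine List.Pairwise.cons ?_ (List.Pairwise.cons ?_ (IH1))
        · intro x hx
          simp only [List.mem_cons] at hx
          rcases hx with rfl | hx
          · simp; try omega
          have := IH2 x hx; push_cast at this ⊢; omega
        · intro x hx
          have := IH2 x hx; push_cast at this ⊢; omega
      · intro x hx
        simp only [List.mem_cons] at hx
        rcases hx with rfl | hx
        · simp; try omega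
        rcases hx with rfl | hx
        · simp; try omega
        have := IH2 x hx; push_cast at this ⊢; omega
    case succ.cons.cons.nil =>
      rw [pvRR3_eq (by simp [pvEnum])]
      obtain ⟨IH1, IH2⟩ := IH tu tc [] (j + 1) (by simp at hlen ⊢; omega)
      simp only [pvEnum] at IH1 IH2 ⊢
      simp only [List.take_succ_cons, List.take_zero, List.take_nil, List.drop_succ_cons,
        List.drop_zero, List.drop_nil, List.nil_append, List.append_nil, List.cons_append]
      constructor
      · refine List.Pairwise.cons ?_ (List.Pairwise.cons ?_ (IH1))
        · intro x hx
          simp only [List.mem_cons] at hx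
          rcases hx with rfl | hx
          · simp; try omega
          have := IH2 x hx; push_cast at this ⊢; omega
        · intro x hx
          have := IH2 x hx; push_cast at this ⊢; omega
      · intro x hx
        simp only [List.mem_cons] at hx
        rcases hx with rfl | hx
        · simp; try omega
        rcases hx with rfl | hx
        · simp; try omega
        have := IH2 x hx; push_cast at this ⊢; omega
    case succ.cons.cons.cons =>
      rw [pvRR3_eq (by simp [pvEnum])]
      obtain ⟨IH1, IH2⟩ := IH tu tc th (j + 1) (by simp at hlen ⊢; omega)
      simp only [pvEnum] at IH1 IH2 ⊢
      simp only [List.take_succ_cons, List.take_zero, List.take_nil, List.drop_succ_cons,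
        List.drop_zero, List.drop_nil, List.nil_append, List.append_nil, List.cons_append]
      constructor
      · refine List.Pairwise.cons ?_ (List.Pairwise.cons ?_ (List.Pairwise.cons ?_ (IH1)))
        · intro x hx
          simp only [List.mem_cons] at hx
          rcases hx with rfl | hx
          · simp; try omega
          rcases hx with rfl | hx
          · simp; try omega
          have := IH2 x hx; push_cast at this ⊢; omega
        · intro x hx
          simp only [List.mem_cons] at hx
          rcases hx with rfl | hx
          · simp; try omega
          have := IH2 x hx; push_cast at this ⊢; omega
        · intro x hx
          have := IH2 x hx; push_cast at this ⊢; omega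
      · intro x hx
        simp only [List.mem_cons] at hx
        rcases hx with rfl | hx
        · simp; try omega
        rcases hx with rfl | hx
        · simp; try omega
        rcases hx with rfl | hx
        · simp; try omega
        have := IH2 x hx; push_cast at this ⊢; omega

theorem pvLen_split : ∀ (rs : List pvRow),
    (pvFU rs).length + (pvFC rs).length + (pvFH rs).length = rs.length := by
  intro rs
  induction rs with
  | nil => simp [pvFU, pvFC, pvFH]
  | cons r t IH =>
    by_cases h1 : pvBkt r = "US" <;> by_cases h2 : pvBkt r = "CN" <;>
      simp [pvFU, pvFC, pvFH, List.filter_cons, h1, h2] at IH ⊢ <;> omega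

theorem pvSorted_keyed (rs : List pvRow) :
    PySem.List.sorted (pvMkKeyed rs 0 0 0) (fun t => t.1) false
      = pvRR3 (pvEnum 0 0 (pvFU rs)) (pvEnum 1 0 (pvFC rs)) (pvEnum 2 0 (pvFH rs)) := by
  apply PySem.List.sorted_eq_of_perm_of_pairwise_lt
  · exact (pvRR3_perm _ (pvEnum 0 0 (pvFU rs)) (pvEnum 1 0 (pvFC rs)) (pvEnum 2 0 (pvFH rs))
      le_rfl).trans (pvMkKeyed_perm rs 0 0 0).symm
  · exact (pvRR3_enum_sorted (((pvFU rs).length + (pvFC rs).length + (pvFH rs).length))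
      (pvFU rs) (pvFC rs) (pvFH rs) 0 le_rfl).1

-- ===== VERDICT (by name: the statement is the Claim_ definition above) =====
theorem interleave_by_market_py_spec : Claim_equal_interleave_by_market_py := by
  intro rows limit _
  unfold Spec_interleave_by_market_py interleave_by_market_py interleave_by_market_py_alt
  by_cases hg : (rows.length : Int) ≤ limit
  · simp [hg]
  · simp only [if_neg hg]
    have hsplit := pvLen_split rows
    have heps := pvEps_le_three (0 % 3) (pvFU rows) (pvFC rows) (pvFH rows)
    have hloop := pvLoopA_fill_spec (3 * rows.length + 4) (pvFU rows) (pvFC rows) (pvFH rows)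
      0 [] limit (by omega)
    simp only [List.length_nil, Int.natCast_zero, Int.sub_zero, List.nil_append, Nat.zero_mod] at hloop
    have hpph : pvPph 0 (pvFU rows) (pvFC rows) (pvFH rows)
        = pvRR3 (pvFU rows) (pvFC rows) (pvFH rows) := by simp [pvPph]
    rw [hpph] at hloop
    have hB := pvFoldB_spec rows PySem.Dict.empty [] 0 0 0 (by decide) (by decide) (by decide)
    simp only [List.nil_append] at hB
    rw [pvFoldA_spec rows [] [] []]
    simp only [List.nil_append]
    rw [show (rows.foldl pvStepB (PySem.Dict.empty, [])).2 = pvMkKeyed rows 0 0 0 from hB]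
    rw [pvSorted_keyed rows]
    rw [pvTakeB_spec]
    simp only [List.length_nil, Int.natCast_zero, Int.sub_zero, List.nil_append]
    change pvAfter limit _ = _
    rw [hloop, List.map_take]
    rw [← pvRR3_map Prod.snd ((pvEnum 0 0 (pvFU rows)).length + (pvEnum 1 0 (pvFC rows)).length
        + (pvEnum 2 0 (pvFH rows)).length) _ _ _ le_rfl]
    rw [pvEnum_map_snd, pvEnum_map_snd, pvEnum_map_snd]
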